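-- pv_equiv track=rewrite | github.com/bendy1234/Bad-Apple | gen_data.py | convert
-- ===== SOURCE A (Python) =====
-- def convert(data):
--     # from [[(pixel, color), ...], ...]
--     # to
--     # [{color:[pixel, ...], ...}, ...]
--     out = []
--     for frame in data:
--         data = {}
--         out.append(data)
--         for (i, color) in frame:
--             data[int(color)] = data.get(int(color), []) + [int(i)]
--
--     return out
-- ===== SOURCE B (Python) =====
-- def convert(data):
--     # For each frame: first compute the distinct colors in first-appearance
--     # order, then build each color's pixel list with one filtering pass.
--     out = []
--     for frame in data:
--         colors = list(dict.fromkeys(int(c) for _, c in frame))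
--         out.append({c: [int(i) for i, cc in frame if int(cc) == c] for c in colors})
--     return out
-- ===== Notes on version B (the rewrite author's own statement) =====
-- stated objective: alternative
-- what changed: B replaces A's element-by-element dict accumulation (repeated get-and-concatenate) by a two-phase pass per frame: dedup the colors in first-appearance order, then build each color's pixel list with a single filter comprehension.
import Mathlib
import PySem

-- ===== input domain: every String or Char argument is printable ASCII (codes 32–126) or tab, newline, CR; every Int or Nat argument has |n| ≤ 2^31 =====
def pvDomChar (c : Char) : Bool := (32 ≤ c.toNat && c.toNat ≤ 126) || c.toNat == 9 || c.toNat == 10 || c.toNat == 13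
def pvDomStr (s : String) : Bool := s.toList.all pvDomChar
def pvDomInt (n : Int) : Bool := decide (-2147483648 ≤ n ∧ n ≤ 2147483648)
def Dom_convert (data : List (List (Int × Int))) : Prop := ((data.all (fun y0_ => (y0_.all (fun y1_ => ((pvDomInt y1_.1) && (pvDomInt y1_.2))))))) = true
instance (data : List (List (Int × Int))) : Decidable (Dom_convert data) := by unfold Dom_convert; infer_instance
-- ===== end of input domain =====

-- B groups each frame in two phases (dedup colors, then filter per color) instead of A's
-- element-by-element dict accumulation; objective: alternative decomposition (int() on an Int is the identity in both ports).

-- ===== PORT A =====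
-- inner loop: data[int(color)] = data.get(int(color), []) + [int(i)]
def convertFrameA (frame : List (Int × Int)) : PySem.Dict Int (List Int) :=
  frame.foldl (fun d p => d.insert p.2 (d.getD p.2 [] ++ [p.1])) PySem.Dict.empty

def convert (data : List (List (Int × Int))) : List (List (Int × List Int)) :=
  data.foldl (fun out frame => out ++ [(convertFrameA frame).items]) []

-- ===== PORT B =====
def convert_alt (data : List (List (Int × Int))) : List (List (Int × List Int)) :=
  data.map (fun frame =>
    (PySem.List.dedup (frame.map (·.2))).map
      (fun c => (c, (frame.filter (fun p => p.2 == c)).map (·.1))))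

-- ===== PRECONDITION & SPEC =====
def Spec_convert (data : List (List (Int × Int))) (out : List (List (Int × List Int))) : Prop := out = convert_alt data
instance (data : List (List (Int × Int))) (out : List (List (Int × List Int))) : Decidable (Spec_convert data out) := by unfold Spec_convert; infer_instance

-- ===== CLAIM (what is proved, stated in full; the proofs are below) =====
def Claim_equal_convert : Prop := ∀ (data : List (List (Int × Int))), Dom_convert data → Spec_convert data (convert data)

-- ===== LEMMAS AND PROOFS =====

-- A's insert-with-getD step is Dict.modify on the swapped pair.
theorem convertFrameA_eq_modify (frame : List (Int × Int)) :
    convertFrameA frame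
      = (frame.map (fun p => (p.2, p.1))).foldl
          (fun d q => d.modify q.1 [] (· ++ [q.2])) PySem.Dict.empty := by
  unfold convertFrameA
  rw [List.foldl_map]
  congr 1

theorem frame_items (frame : List (Int × Int)) :
    (convertFrameA frame).items
      = (PySem.List.dedup (frame.map (·.2))).map
          (fun c => (c, (frame.filter (fun p => p.2 == c)).map (·.1))) := by
  rw [convertFrameA_eq_modify]
  set s := frame.map (fun p => (p.2, p.1)) with hs
  have hkeys : ((s.foldl (fun d q => d.modify q.1 [] (· ++ [q.2])) PySem.Dict.empty).keys)
      = PySem.List.dedup (frame.map (·.2)) := by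
    rw [PySem.Dict.keys_foldl_modify_key]
    simp [hs, List.map_map, PySem.Set.update_nil_left, Function.comp_def]
  have hnd : ((s.foldl (fun d q => d.modify q.1 [] (· ++ [q.2])) PySem.Dict.empty).keys).Nodup := by
    rw [hkeys]; exact PySem.List.nodup_dedup _
  rw [PySem.Dict.items_eq_map_keys _ hnd ([] : List Int), hkeys]
  apply List.map_congr_left
  intro c _
  rw [PySem.Dict.getD_foldl_modify_append]
  simp [hs, List.filter_map, List.map_map, Function.comp_def]


-- ===== VERDICT (by name: the statement is the Claim_ definition above) =====
theorem convert_spec : Claim_equal_convert := by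
  intro data _
  unfold Spec_convert convert convert_alt
  rw [PySem.List.foldl_append_singleton_eq_map]
  exact List.map_congr_left (fun frame _ => frame_items frame)
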